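-- pv_equiv track=rewrite | github.com/tdavchev/algorithms | easy/intersection_of_two.py | intersection_proper
-- ===== SOURCE A (Python) =====
-- def intersection_proper(nums1, nums2):
--     lookup = {}
--     solution = []
--     for num in nums1:
--         if num not in lookup:
--             lookup[num] = True
--
--     for num in nums2:
--         if num in lookup:
--             lookup[num] = False
--
--     for key, val in lookup.items():
--         if val is False:
--             solution.append(key)
--
--     return solution
-- ===== SOURCE B (Python) =====
-- def intersection_proper(nums1, nums2):
--     set2 = set(nums2)
--     seen = set()
--     result = []
--     for num in nums1:
--         if num in set2 and num not in seen:
--             seen.add(num)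
--             result.append(num)
--     return result
-- ===== Notes on version B (the rewrite author's own statement) =====
-- stated objective: simpler
-- what changed: Replaced A's three passes over a tri-state marker dict (build True-marks from nums1, flip to False from nums2, then scan the dict items) by one filtering pass over nums1 with a membership set for nums2 and a seen-set for dedup.
import Mathlib
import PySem

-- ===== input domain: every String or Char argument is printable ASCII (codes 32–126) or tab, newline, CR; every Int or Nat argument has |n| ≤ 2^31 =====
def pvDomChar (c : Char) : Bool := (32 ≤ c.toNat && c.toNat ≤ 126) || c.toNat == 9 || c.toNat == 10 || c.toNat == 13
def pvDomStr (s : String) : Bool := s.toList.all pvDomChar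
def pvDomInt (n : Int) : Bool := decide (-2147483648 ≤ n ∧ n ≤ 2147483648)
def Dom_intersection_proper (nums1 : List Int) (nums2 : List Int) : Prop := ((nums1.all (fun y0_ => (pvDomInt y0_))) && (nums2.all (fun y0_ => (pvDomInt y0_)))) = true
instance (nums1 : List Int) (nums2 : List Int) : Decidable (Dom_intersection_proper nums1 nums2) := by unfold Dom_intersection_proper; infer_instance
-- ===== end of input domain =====

-- B replaces A's three passes over a tri-state marker dict by one filtering pass over
-- nums1 with a membership set for nums2 and a seen-set for deduplication.

-- ===== PORT A =====
-- literal port of A: first loop marks nums1's keys True, second flips common keys to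
-- False, third collects the False keys from the dict items in insertion order
def intersection_proper (nums1 : List Int) (nums2 : List Int) : List Int :=
  let lookup : PySem.Dict Int Bool :=
    nums1.foldl (fun d num => if d.contains num then d else d.insert num true) PySem.Dict.empty
  let lookup2 : PySem.Dict Int Bool :=
    nums2.foldl (fun d num => if d.contains num then d.insert num false else d) lookup
  lookup2.items.foldl (fun sol p => if p.2 = false then sol ++ [p.1] else sol) []

-- ===== PORT B =====
-- literal port of B: set2 = set(nums2); one pass over nums1 keeping (result, seen)
def intersection_proper_alt (nums1 : List Int) (nums2 : List Int) : List Int :=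
  let set2 : PySem.Set Int := PySem.Set.ofList nums2
  let st : List Int × PySem.Set Int :=
    nums1.foldl
      (fun st num =>
        if PySem.Set.contains set2 num && !(PySem.Set.contains st.2 num) then
          (st.1 ++ [num], PySem.Set.add st.2 num)
        else st)
      ([], PySem.Set.empty)
  st.1

-- ===== PRECONDITION & SPEC =====
def Spec_intersection_proper (nums1 : List Int) (nums2 : List Int) (out : List Int) : Prop := out = intersection_proper_alt nums1 nums2
instance (nums1 : List Int) (nums2 : List Int) (out : List Int) : Decidable (Spec_intersection_proper nums1 nums2 out) := by unfold Spec_intersection_proper; infer_instance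

-- ===== CLAIM (what is proved, stated in full; the proofs are below) =====
def Claim_equal_intersection_proper : Prop := ∀ (nums1 : List Int) (nums2 : List Int), Dom_intersection_proper nums1 nums2 → Spec_intersection_proper nums1 nums2 (intersection_proper nums1 nums2)

-- ===== LEMMAS AND PROOFS =====

lemma loop1_get? (l : List Int) (d : PySem.Dict Int Bool) (k : Int) :
    (l.foldl (fun d num => if d.contains num then d else d.insert num true) d).get? k
      = if d.contains k then d.get? k else (if k ∈ l then some true else none) := by
  induction l generalizing d with
  | nil =>
    simp only [List.foldl_nil, List.not_mem_nil, if_false]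
    split_ifs with h
    · rfl
    · rw [← Option.not_isSome_iff_eq_none, ← PySem.Dict.contains_eq_isSome_get?]
      simp [h]
  | cons num t ih =>
    simp only [List.foldl_cons]
    by_cases hc : d.contains num
    · rw [if_pos hc, ih]
      by_cases hk : d.contains k
      · simp [hk]
      · have : k ≠ num := fun h => by rw [h] at hk; exact absurd hc (by simp [hk])
        simp [hk, List.mem_cons, this]
    · rw [if_neg hc, ih]
      by_cases hkn : k = num
      · subst hkn
        simp [PySem.Dict.contains_insert_self, PySem.Dict.get?_insert_self, hc]
      · simp [PySem.Dict.contains_insert, PySem.Dict.get?_insert, hkn, List.mem_cons]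

lemma loop1_keys (l : List Int) (d : PySem.Dict Int Bool) :
    (l.foldl (fun d num => if d.contains num then d else d.insert num true) d).keys
      = PySem.Set.update d.keys l := by
  induction l generalizing d with
  | nil => rfl
  | cons num t ih =>
    simp only [List.foldl_cons, PySem.Set.update, PySem.Set.add]
    by_cases hc : d.contains num
    · rw [if_pos hc, ih]
      have hm : num ∈ d.keys := (PySem.Dict.contains_iff_mem_keys _ _).mp hc
      simp [PySem.Set.update, hm]
    · rw [if_neg hc, ih, PySem.Dict.keys_insert_of_not_contains _ _ (by simpa using hc)]
      have hm : num ∉ d.keys := fun h => hc ((PySem.Dict.contains_iff_mem_keys _ _).mpr h)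
      simp [PySem.Set.update, hm]

lemma loop2_get? (l : List Int) (d : PySem.Dict Int Bool) (k : Int) :
    (l.foldl (fun d num => if d.contains num then d.insert num false else d) d).get? k
      = if d.contains k ∧ k ∈ l then some false else d.get? k := by
  induction l generalizing d with
  | nil => simp
  | cons num t ih =>
    simp only [List.foldl_cons]
    by_cases hc : d.contains num
    · rw [if_pos hc, ih]
      by_cases hkn : k = num
      · subst hkn
        simp [PySem.Dict.contains_insert_self, PySem.Dict.get?_insert_self, hc, List.mem_cons]
      · simp [PySem.Dict.contains_insert, PySem.Dict.get?_insert, hkn, List.mem_cons]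
    · rw [if_neg hc, ih]
      by_cases hkn : k = num
      · subst hkn; simp [hc]
      · simp [hkn, List.mem_cons]

lemma loop2_keys (l : List Int) (d : PySem.Dict Int Bool) :
    (l.foldl (fun d num => if d.contains num then d.insert num false else d) d).keys
      = d.keys := by
  induction l generalizing d with
  | nil => rfl
  | cons num t ih =>
    simp only [List.foldl_cons]
    by_cases hc : d.contains num
    · rw [if_pos hc, ih, PySem.Dict.keys_insert_of_contains _ _ hc]
    · rw [if_neg hc, ih]

lemma items_eq_map_keys (d : PySem.Dict Int Bool) (h : d.keys.Nodup) (dflt : Bool) :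
    d.items = d.keys.map (fun k => (k, d.getD k dflt)) := by
  have : d.keys = d.items.map (·.1) := by simp [PySem.Dict.keys]
  rw [this, List.map_map]
  conv_lhs => rw [← List.map_id d.items]
  apply List.map_congr_left
  intro p hp
  have := PySem.Dict.getD_of_mem_items (d := d) (by simpa using hp) h (d0 := dflt)
  simp [Function.comp, this]

lemma loop3_eq (l : List (Int × Bool)) (acc : List Int) :
    l.foldl (fun sol p => if p.2 = false then sol ++ [p.1] else sol) acc
      = acc ++ (l.filter (fun p => p.2 == false)).map (·.1) := by
  induction l generalizing acc with
  | nil => simp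
  | cons p t ih =>
    simp only [List.foldl_cons, List.filter_cons]
    by_cases hp : p.2 = false
    · simp [hp, ih]
    · simp [hp, ih]

lemma loopB (s2 : PySem.Set Int) (l : List Int) (acc : List Int) :
    l.foldl
      (fun st num =>
        if PySem.Set.contains s2 num && !(PySem.Set.contains st.2 num) then
          (st.1 ++ [num], PySem.Set.add st.2 num)
        else st)
      (acc, acc)
      = (PySem.Set.update acc (l.filter (fun x => PySem.Set.contains s2 x)),
         PySem.Set.update acc (l.filter (fun x => PySem.Set.contains s2 x))) := by
  induction l generalizing acc with
  | nil => rfl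
  | cons num t ih =>
    simp only [List.foldl_cons, List.filter_cons]
    by_cases h2 : PySem.Set.contains s2 num
    · simp only [h2, Bool.true_and, if_true]
      by_cases hs : PySem.Set.contains acc num
      · simp only [hs, Bool.not_true, Bool.false_eq_true, if_false]
        have hs' : num ∈ acc := by simpa [PySem.Set.contains] using hs
        have hadd : PySem.Set.add acc num = acc := by simp [PySem.Set.add, hs']
        have e2 : PySem.Set.update acc (num :: t.filter (fun x => PySem.Set.contains s2 x))
            = PySem.Set.update (PySem.Set.add acc num) (t.filter (fun x => PySem.Set.contains s2 x)) := rfl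
        rw [e2, hadd]
        exact ih acc
      · simp only [hs, Bool.not_false, if_true]
        have hs' : num ∉ acc := by simpa [PySem.Set.contains] using hs
        have hadd : PySem.Set.add acc num = acc ++ [num] := by simp [PySem.Set.add, hs']
        have e2 : PySem.Set.update acc (num :: t.filter (fun x => PySem.Set.contains s2 x))
            = PySem.Set.update (PySem.Set.add acc num) (t.filter (fun x => PySem.Set.contains s2 x)) := rfl
        rw [e2, ← ih (PySem.Set.add acc num), hadd]
    · simp only [h2, Bool.false_and, Bool.false_eq_true, if_false]
      exact ih acc

lemma update_filter (p : Int → Bool) (l : List Int) (s : List Int) :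
    PySem.Set.update (s.filter p) (l.filter p) = (PySem.Set.update s l).filter p := by
  induction l generalizing s with
  | nil => rfl
  | cons x t ih =>
    simp only [List.filter_cons]
    by_cases hp : p x
    · have hadd : PySem.Set.add (s.filter p) x = (PySem.Set.add s x).filter p := by
        by_cases hm : x ∈ s
        · simp [PySem.Set.add, hm, List.mem_filter, hp]
        · simp [PySem.Set.add, hm, List.mem_filter, hp, List.filter_append]
      simp only [hp, if_true]
      have e1 : PySem.Set.update (s.filter p) (x :: t.filter p)
          = PySem.Set.update (PySem.Set.add (s.filter p) x) (t.filter p) := rfl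
      have e2 : PySem.Set.update s (x :: t) = PySem.Set.update (PySem.Set.add s x) t := rfl
      rw [e1, hadd, ih, e2]
    · have hadd : (PySem.Set.add s x).filter p = s.filter p := by
        by_cases hm : x ∈ s
        · simp [PySem.Set.add, hm]
        · simp [PySem.Set.add, hm, List.filter_append, hp]
      have e2 : PySem.Set.update s (x :: t) = PySem.Set.update (PySem.Set.add s x) t := rfl
      simp only [hp, Bool.false_eq_true, if_false]
      rw [e2, ← ih, hadd]

lemma intersection_proper_eq_alt (n1 n2 : List Int) :
    intersection_proper n1 n2 = intersection_proper_alt n1 n2 := by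
  unfold intersection_proper intersection_proper_alt
  have hB : (n1.foldl
      (fun st num =>
        if PySem.Set.contains (PySem.Set.ofList n2) num && !(PySem.Set.contains st.2 num) then
          (st.1 ++ [num], PySem.Set.add st.2 num)
        else st)
      ([], PySem.Set.empty)).1
      = (PySem.Set.update ([] : List Int) n1).filter (fun x => PySem.Set.contains (PySem.Set.ofList n2) x) := by
    rw [show (PySem.Set.empty : PySem.Set Int) = ([] : List Int) from rfl, loopB, ← update_filter]
    rfl
  set d1 := n1.foldl (fun d num => if d.contains num then d else d.insert num true) PySem.Dict.empty with hd1
  set d2 := n2.foldl (fun d num => if d.contains num then d.insert num false else d) d1 with hd2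
  have hg1 : ∀ k, d1.get? k = if k ∈ n1 then some true else none := by
    intro k; rw [hd1, loop1_get?]; simp
  have hc1 : ∀ k, d1.contains k = true ↔ k ∈ n1 := by
    intro k
    rw [PySem.Dict.contains_eq_isSome_get?, hg1]
    by_cases h : k ∈ n1 <;> simp [h]
  have hk1 : d1.keys = PySem.Set.ofList n1 := by
    rw [hd1, loop1_keys, PySem.Dict.keys_empty]
    rfl
  have hk2 : d2.keys = PySem.Set.ofList n1 := by rw [hd2, loop2_keys, hk1]
  have hnd : d2.keys.Nodup := by rw [hk2]; exact PySem.Set.nodup_ofList n1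
  have hg2 : ∀ k, k ∈ n1 → d2.getD k false = !(decide (k ∈ n2)) := by
    intro k hk
    rw [PySem.Dict.getD_eq_get?_getD, hd2, loop2_get?, hg1]
    by_cases h2 : k ∈ n2 <;> simp [hk, (hc1 k).mpr hk, h2]
  rw [loop3_eq, items_eq_map_keys d2 hnd false, hk2, hB, List.filter_map]
  rw [List.filter_congr (l := PySem.Set.ofList n1)
      (p := (fun p => p.2 == false) ∘ (fun k => (k, d2.getD k false)))
      (q := fun x => PySem.Set.contains (PySem.Set.ofList n2) x)
      (by
        intro x hx
        have hx1 : x ∈ n1 := (PySem.Set.mem_ofList n1 x).mp hx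
        simp [Function.comp, hg2 x hx1, PySem.Set.contains, PySem.Set.mem_ofList])]
  simp only [List.map_map, List.nil_append]
  have : ((fun p : Int × Bool => p.1) ∘ fun k => (k, d2.getD k false)) = id := rfl
  rw [this, List.map_id]
  rfl

-- ===== VERDICT (by name: the statement is the Claim_ definition above) =====
theorem intersection_proper_spec : Claim_equal_intersection_proper := by
  intro n1 n2 _
  exact intersection_proper_eq_alt n1 n2
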